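-- pv_equiv track=rewrite | github.com/lrq619/LLMLayer | main.py | total_mem_accessed
-- ===== SOURCE A (Python) =====
-- def total_mem_accessed(kernel_metrics):
--     kernels = kernel_metrics[-7:]
--     kernels_weights = kernel_metrics[-7:-4]
--     kernels_kvc = kernel_metrics[-4:]
--
--     total_mem_read = 0
--     total_mem_write = 0
--     for k in kernels:
--         total_mem_read += k["read"]
--         total_mem_write += k["write"]
--
--     weights_mem_read = 0
--     weights_mem_write = 0
--     for k in kernels_weights:
--         weights_mem_read += k["read"]
--         weights_mem_write += k["write"]
--
--     kvc_mem_read = 0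
--     kvc_mem_write = 0
--     for k in kernels_kvc:
--         kvc_mem_read += k["read"]
--         kvc_mem_write += k["write"]
--
--
--     return total_mem_read + total_mem_write, weights_mem_read + weights_mem_write, kvc_mem_read + kvc_mem_write
-- ===== SOURCE B (Python) =====
-- def total_mem_accessed(kernel_metrics):
--     # Single back-to-front pass: walk the reversed list once, stop after 7 kernels;
--     # positions 0-3 from the end are the kvc kernels, positions 4-6 the weights kernels.
--     weights = 0
--     kvc = 0
--     for i, k in enumerate(reversed(kernel_metrics)):
--         if i >= 7:
--             break
--         v = k["read"] + k["write"]
--         if i < 4: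
--             kvc += v
--         else:
--             weights += v
--     return weights + kvc, weights, kvc
-- ===== Notes on version B (the rewrite author's own statement) =====
-- stated objective: alternative
-- what changed: B replaces A's three slice-building passes with a single back-to-front traversal that classifies each kernel by its distance from the end (index < 4 goes to kvc, 4..6 to weights) and stops after seven elements, deriving the total as the sum of the two accumulators.
import Mathlib
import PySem

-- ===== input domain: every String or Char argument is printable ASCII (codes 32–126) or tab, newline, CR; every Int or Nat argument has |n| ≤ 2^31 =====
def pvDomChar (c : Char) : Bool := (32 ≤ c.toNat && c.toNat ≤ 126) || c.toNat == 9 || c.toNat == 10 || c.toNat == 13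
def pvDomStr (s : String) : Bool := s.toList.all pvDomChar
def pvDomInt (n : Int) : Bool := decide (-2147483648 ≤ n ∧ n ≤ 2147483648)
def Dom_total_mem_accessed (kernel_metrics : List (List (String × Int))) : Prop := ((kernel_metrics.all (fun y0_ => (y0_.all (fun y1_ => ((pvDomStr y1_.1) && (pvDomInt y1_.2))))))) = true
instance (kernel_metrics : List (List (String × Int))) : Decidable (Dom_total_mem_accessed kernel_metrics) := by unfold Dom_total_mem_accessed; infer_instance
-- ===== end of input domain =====

-- B replaces A's three slice loops with a single back-to-front traversal that classifies each
-- kernel by its index from the end (0-3 kvc, 4-6 weights) and stops after seven; objective: alternative.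


-- ===== PORT A =====
-- A's accumulation loop over one slice: running (read_sum, write_sum) pair.
def pvLoopA (ks : List (List (String × Int))) (init : Int × Int) : Int × Int :=
  ks.foldl (fun p k => (p.1 + PySem.Dict.getD (PySem.Dict.mk k) "read" 0, p.2 + PySem.Dict.getD (PySem.Dict.mk k) "write" 0)) init

def total_mem_accessed (kernel_metrics : List (List (String × Int))) : Int × Int × Int :=
  let kernels := PySem.List.slice kernel_metrics (some (-7)) none
  let kernels_weights := PySem.List.slice kernel_metrics (some (-7)) (some (-4))
  let kernels_kvc := PySem.List.slice kernel_metrics (some (-4)) none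
  let t := pvLoopA kernels (0, 0)
  let w := pvLoopA kernels_weights (0, 0)
  let v := pvLoopA kernels_kvc (0, 0)
  (t.1 + t.2, w.1 + w.2, v.1 + v.2)

-- ===== PORT B =====
-- read+write of one kernel dict (k["read"] + k["write"]).
def pvRW (k : List (String × Int)) : Int :=
  PySem.Dict.getD (PySem.Dict.mk k) "read" 0 + PySem.Dict.getD (PySem.Dict.mk k) "write" 0

-- B's single loop over the reversed list: index i from the end; stop at 7; i<4 → kvc, else weights.
def pvLoopB : Nat → List (List (String × Int)) → Int × Int → Int × Int
  | _, [], acc => acc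
  | i, k :: ks, acc =>
    if 7 ≤ i then acc
    else if i < 4 then pvLoopB (i + 1) ks (acc.1, acc.2 + pvRW k)
    else pvLoopB (i + 1) ks (acc.1 + pvRW k, acc.2)

def total_mem_accessed_alt (kernel_metrics : List (List (String × Int))) : Int × Int × Int :=
  let p := pvLoopB 0 kernel_metrics.reverse (0, 0)
  (p.1 + p.2, p.1, p.2)

-- ===== PRECONDITION & SPEC =====
-- Pre_: every dict in the last seven entries has both "read" and "write" keys; on a dict missing
-- one of them Python A raises KeyError.
def Pre_total_mem_accessed (kernel_metrics : List (List (String × Int))) : Prop :=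
  ∀ k ∈ PySem.List.slice kernel_metrics (some (-7)) none,
    (PySem.Dict.get? (PySem.Dict.mk k) "read").isSome ∧ (PySem.Dict.get? (PySem.Dict.mk k) "write").isSome
instance (kernel_metrics : List (List (String × Int))) : Decidable (Pre_total_mem_accessed kernel_metrics) := by unfold Pre_total_mem_accessed; infer_instance

def pvWitness_total_mem_accessed : (List (List (String × Int))) :=
  [[("read", 3), ("write", 4)], [("read", 1), ("write", 2)]]

def Spec_total_mem_accessed (kernel_metrics : List (List (String × Int))) (out : Int × Int × Int) : Prop := out = total_mem_accessed_alt kernel_metrics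
instance (kernel_metrics : List (List (String × Int))) (out : Int × Int × Int) : Decidable (Spec_total_mem_accessed kernel_metrics out) := by unfold Spec_total_mem_accessed; infer_instance

-- ===== CLAIM (what is proved, stated in full; the proofs are below) =====
def Claim_equal_total_mem_accessed : Prop := ∀ (kernel_metrics : List (List (String × Int))), Dom_total_mem_accessed kernel_metrics → Pre_total_mem_accessed kernel_metrics → Spec_total_mem_accessed kernel_metrics (total_mem_accessed kernel_metrics)

-- ===== LEMMAS AND PROOFS =====

-- A's pair loop computes the two component sums.
theorem pvLoopA_eq (ks : List (List (String × Int))) (init : Int × Int) :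
    pvLoopA ks init =
      (init.1 + (ks.map (fun k => PySem.Dict.getD (PySem.Dict.mk k) "read" 0)).sum,
       init.2 + (ks.map (fun k => PySem.Dict.getD (PySem.Dict.mk k) "write" 0)).sum) := by
  induction ks generalizing init with
  | nil => simp [pvLoopA]
  | cons k ks ih =>
    simp [pvLoopA, List.foldl_cons] at *
    rw [ih]
    simp
    constructor <;> ring

theorem pvLoopA_sum (ks : List (List (String × Int))) :
    (pvLoopA ks (0, 0)).1 + (pvLoopA ks (0, 0)).2 = (ks.map pvRW).sum := by
  rw [pvLoopA_eq]
  simp only [zero_add]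
  exact (PySem.List.sum_map_add_int ks _ _).symm

-- B's loop, started at index i, adds the slice-of-take sums to the accumulator.
theorem pvLoopB_eq (rs : List (List (String × Int))) :
    ∀ (i : Nat) (w v : Int),
      pvLoopB i rs (w, v) =
        (w + (((rs.take (7 - i)).drop (4 - i)).map pvRW).sum,
         v + ((rs.take (4 - i)).map pvRW).sum) := by
  induction rs with
  | nil => intro i w v; simp [pvLoopB]
  | cons k ks ih =>
    intro i w v
    by_cases h7 : 7 ≤ i
    · have e7 : 7 - i = 0 := by omega
      have e4 : 4 - i = 0 := by omega
      simp [pvLoopB, h7, e7, e4]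
    · by_cases h4 : i < 4
      · have e7 : 7 - i = (7 - (i + 1)) + 1 := by omega
        have e4 : 4 - i = (4 - (i + 1)) + 1 := by omega
        rw [pvLoopB]
        simp only [h7, if_false, h4, if_true, ih (i + 1), e7, e4,
          List.take_succ_cons, List.drop_succ_cons, List.map_cons, List.sum_cons, add_assoc]
      · have e7 : 7 - i = (7 - (i + 1)) + 1 := by omega
        have e4 : 4 - i = 0 := by omega
        have e4' : 4 - (i + 1) = 0 := by omega
        rw [pvLoopB]
        simp only [h7, if_false, h4, if_false, ih (i + 1), e7, e4, e4',
          List.take_succ_cons, List.take_zero, List.drop_zero, List.map_cons, List.sum_cons,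
          List.map_nil, List.sum_nil, add_assoc]

-- The three Python slices, written as drop/take of the original list.
theorem pvSlice7 (xs : List (List (String × Int))) :
    PySem.List.slice xs (some (-7)) none = xs.drop (xs.length - 7) :=
  PySem.List.slice_from_neg_ofNat xs 7 (by omega)

theorem pvSlice4 (xs : List (List (String × Int))) :
    PySem.List.slice xs (some (-4)) none = xs.drop (xs.length - 4) :=
  PySem.List.slice_from_neg_ofNat xs 4 (by omega)

theorem pvSliceW (xs : List (List (String × Int))) :
    PySem.List.slice xs (some (-7)) (some (-4)) =
      (xs.drop (xs.length - 7)).take (xs.length - 4 - (xs.length - 7)) := by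
  simp only [PySem.List.slice, Int.reduceNeg, Nat.ofNat_pos, PySem.List.clampIdx_neg_ofNat]

-- B's kvc part is the sum over the [-4:] slice.
theorem pvKvc_eq (xs : List (List (String × Int))) :
    ((xs.reverse.take 4).map pvRW).sum = ((xs.drop (xs.length - 4)).map pvRW).sum := by
  rw [List.take_reverse, List.map_reverse, List.sum_reverse]

-- B's weights part is the sum over the [-7:-4] slice.
theorem pvWeights_eq (xs : List (List (String × Int))) :
    (((xs.reverse.take 7).drop 4).map pvRW).sum =
      (((xs.drop (xs.length - 7)).take (xs.length - 4 - (xs.length - 7))).map pvRW).sum := by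
  have h1 : (xs.reverse.take 7).drop 4 =
      ((xs.drop (xs.length - 7)).take (xs.length - 4 - (xs.length - 7))).reverse := by
    rw [List.take_reverse, List.drop_reverse]
    congr 2
    simp only [List.length_drop]
    omega
  rw [h1, List.map_reverse, List.sum_reverse]

-- The last-seven sum splits as weights + kvc.
theorem pvSplit (xs : List (List (String × Int))) :
    ((xs.drop (xs.length - 7)).map pvRW).sum =
      (((xs.drop (xs.length - 7)).take (xs.length - 4 - (xs.length - 7))).map pvRW).sum +
        ((xs.drop (xs.length - 4)).map pvRW).sum := by
  conv_lhs => rw [← List.take_append_drop (xs.length - 4 - (xs.length - 7)) (xs.drop (xs.length - 7))]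
  rw [List.map_append, List.sum_append, List.drop_drop]
  have h : xs.length - 7 + (xs.length - 4 - (xs.length - 7)) = xs.length - 4 := by omega
  rw [h]

-- ===== VERDICT (by name: the statement is the Claim_ definition above) =====
theorem total_mem_accessed_spec : Claim_equal_total_mem_accessed := by
  intro km _ _
  show total_mem_accessed km = total_mem_accessed_alt km
  simp only [total_mem_accessed, total_mem_accessed_alt, pvLoopB_eq, Nat.sub_zero,
    pvLoopA_sum, pvSlice7, pvSlice4, pvSliceW, pvKvc_eq, pvWeights_eq, zero_add]
  rw [pvSplit]
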